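-- pv_equiv track=rewrite | github.com/lkaesberg/sparc-gym-analysis | plot_difficulty_vs_steps.py | clean_path
-- ===== SOURCE A (Python) =====
-- def clean_path(path):
--     """Remove loops/detours from a path.
--
--     If the same coordinate is visited twice, remove everything between
--     the first and second occurrence (keeping only the second occurrence).
--
--     Example: [A, B, C, B, D] -> [A, B, D]
--     """
--     if not path:
--         return []
--
--     # Convert path to list of tuples for hashing
--     # Handle both dict format {'x': x, 'y': y} and list format [x, y]
--     path_tuples = []
--     for p in path:
--         if isinstance(p, dict):
--             path_tuples.append((p.get('x'), p.get('y')))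
--         else:
--             path_tuples.append(tuple(p))
--
--     cleaned = []
--     for coord in path_tuples:
--         # Check if this coordinate is already in the cleaned path
--         if coord in cleaned:
--             # Remove everything from the first occurrence onwards
--             idx = cleaned.index(coord)
--             cleaned = cleaned[:idx]
--         cleaned.append(coord)
--
--     return cleaned
-- ===== SOURCE B (Python) =====
-- def clean_path(path):
--     """Remove loops/detours from a path.
--
--     Different algorithm than truncate-on-repeat: loop erasure has the
--     classical equivalent characterization "keep the current coordinate,
--     then jump directly past its LAST occurrence".  So: one pass builds a
--     last-occurrence index for every coordinate, a second pass walks the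
--     path by jumping from each kept coordinate to just after its last
--     occurrence.  No cleaned-prefix is ever scanned or truncated.
--     """
--     if not path:
--         return []
--     pts = []
--     for p in path:
--         if isinstance(p, dict):
--             pts.append((p.get('x'), p.get('y')))
--         else:
--             pts.append(tuple(p))
--     last = {}
--     for i, c in enumerate(pts):
--         last[c] = i
--     res = []
--     i = 0
--     while i < len(pts):
--         c = pts[i]
--         res.append(c)
--         i = last[c] + 1
--     return res
-- ===== Notes on version B (the rewrite author's own statement) =====
-- stated objective: alternative
-- what changed: Replaces A's incremental truncate-on-repeat loop (membership test, list.index and slice over the growing cleaned prefix at every step) by the classical equivalent characterization of loop erasure: build a last-occurrence index in one pass, then emit coordinates while jumping directly past each coordinate's last occurrence; no cleaned prefix is ever scanned or truncated.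
import Mathlib
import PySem

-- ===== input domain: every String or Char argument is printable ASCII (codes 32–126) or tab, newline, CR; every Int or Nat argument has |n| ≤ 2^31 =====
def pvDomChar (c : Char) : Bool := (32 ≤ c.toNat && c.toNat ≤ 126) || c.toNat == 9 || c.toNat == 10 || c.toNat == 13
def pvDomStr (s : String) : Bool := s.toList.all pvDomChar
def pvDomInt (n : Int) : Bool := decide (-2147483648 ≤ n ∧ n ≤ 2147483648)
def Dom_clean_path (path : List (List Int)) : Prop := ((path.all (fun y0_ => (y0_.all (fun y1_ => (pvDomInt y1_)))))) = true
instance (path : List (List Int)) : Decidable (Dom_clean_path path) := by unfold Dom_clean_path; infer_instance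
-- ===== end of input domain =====

-- B (alternative): instead of A's truncate-on-repeat loop over the growing
-- cleaned prefix, B builds a last-occurrence index once and emits coordinates
-- while jumping directly past each coordinate's last occurrence (the classical
-- equivalent characterization of loop erasure).
-- Under the type convention elements are List Int, so A's dict branch is never
-- taken and tuple(p) is the identity.

-- ===== PORT A =====
-- A's loop body: if coord already in cleaned, cut back to before its first
-- occurrence (membership test, then list.index, then slice), then append.
def cleanStepA (cleaned : List (List Int)) (coord : List Int) : List (List Int) :=
  (if cleaned.contains coord then
     match PySem.List.index? cleaned coord with
     | some idx => PySem.List.slice cleaned none (some (idx : Int))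
     | none => cleaned
   else cleaned) ++ [coord]

def clean_path (path : List (List Int)) : List (List Int) :=
  if path = [] then []
  else
    -- path_tuples: elements are lists, so tuple(p) = p (dict branch unreachable)
    let path_tuples := path.foldl (fun acc p => acc ++ [p]) ([] : List (List Int))
    path_tuples.foldl cleanStepA []

-- ===== PORT B =====
-- last = {}; for i, c in enumerate(pts): last[c] = i
def lastDict (pts : List (List Int)) : PySem.Dict (List Int) Nat :=
  pts.zipIdx.foldl (fun d ci => d.insert ci.1 ci.2) PySem.Dict.empty

-- the while loop: res.append(pts[i]); i = last[pts[i]] + 1 — fuel = pts.length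
-- is enough since i strictly increases each step (the equivalence proof below
-- never reaches the fuel-exhausted branch).
def goB (pts : List (List Int)) (last : PySem.Dict (List Int) Nat) :
    Nat → Nat → List (List Int) → List (List Int)
  | 0, _, res => res
  | fuel + 1, i, res =>
    if i < pts.length then
      match pts[i]? with
      | none => res                       -- unreachable: i < len pts
      | some c =>
        match last.get? c with
        | none => res ++ [c]              -- unreachable: c occurs in pts
        | some j => goB pts last fuel (j + 1) (res ++ [c])
    else res

def clean_path_alt (path : List (List Int)) : List (List Int) :=
  if path = [] then []
  else
    -- pts: elements are lists, so tuple(p) = p (dict branch unreachable)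
    let pts := path.foldl (fun acc p => acc ++ [p]) ([] : List (List Int))
    goB pts (lastDict pts) pts.length 0 []

-- ===== PRECONDITION & SPEC =====
def Spec_clean_path (path : List (List Int)) (out : List (List Int)) : Prop := out = clean_path_alt path
instance (path : List (List Int)) (out : List (List Int)) : Decidable (Spec_clean_path path out) := by unfold Spec_clean_path; infer_instance

-- ===== CLAIM (what is proved, stated in full; the proofs are below) =====
def Claim_equal_clean_path : Prop := ∀ (path : List (List Int)), Dom_clean_path path → Spec_clean_path path (clean_path path)

-- ===== LEMMAS AND PROOFS =====

-- the common mathematical form of loop erasure: keep the head, jump past its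
-- last occurrence
def afterLast (a : List Int) (xs : List (List Int)) : List (List Int) :=
  (xs.reverse.takeWhile (fun x => x ≠ a)).reverse

lemma afterLast_length_le (a : List Int) (xs : List (List Int)) :
    (afterLast a xs).length ≤ xs.length := by
  unfold afterLast
  calc (xs.reverse.takeWhile (fun x => x ≠ a)).reverse.length
      = (xs.reverse.takeWhile (fun x => x ≠ a)).length := by rw [List.length_reverse]
    _ ≤ xs.reverse.length := (List.takeWhile_sublist _).length_le
    _ = xs.length := List.length_reverse

def le_ : List (List Int) → List (List Int)
  | [] => []
  | a :: xs => a :: le_ (afterLast a xs)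
  termination_by l => l.length
  decreasing_by
    simpa using Nat.lt_succ_of_le (afterLast_length_le a xs)

lemma afterLast_not_mem (a : List Int) (xs : List (List Int)) (h : a ∉ xs) :
    afterLast a xs = xs := by
  unfold afterLast
  rw [List.takeWhile_eq_self_iff.2, List.reverse_reverse]
  intro x hx
  simp only [ne_eq, decide_eq_true_eq]
  intro hxa
  exact h (hxa ▸ (List.mem_reverse.1 hx))

lemma afterLast_append (a : List Int) (ys zs : List (List Int)) (h : a ∉ zs) :
    afterLast a (ys ++ a :: zs) = zs := by
  unfold afterLast
  rw [List.reverse_append, List.reverse_cons, List.append_assoc,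
      List.takeWhile_append]
  have h1 : zs.reverse.takeWhile (fun x => decide (x ≠ a)) = zs.reverse := by
    rw [List.takeWhile_eq_self_iff.2]
    intro x hx
    simp only [ne_eq, decide_eq_true_eq]
    intro hxa
    exact h (hxa ▸ (List.mem_reverse.1 hx))
  rw [if_pos (by rw [h1])]
  simp

-- ---- A-side: the fold satisfies le_'s recurrence ----

-- stepping on a coordinate different from the head keeps the head and acts on
-- the tail
lemma cleanStepA_cons_ne (a : List Int) (pre : List (List Int)) (c : List Int)
    (h : c ≠ a) : cleanStepA (a :: pre) c = a :: cleanStepA pre c := by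
  unfold cleanStepA
  by_cases hm : c ∈ pre
  · have hc : (a :: pre).contains c = true := by simp [hm]
    have hc' : pre.contains c = true := by simpa using hm
    rw [hc, hc', if_pos rfl, if_pos rfl,
        PySem.List.index?_cons_of_ne pre (fun h' => h h'.symm)]
    obtain ⟨idx, hidx⟩ := Option.isSome_iff_exists.mp
      ((PySem.List.index?_isSome_iff pre c).2 hm)
    rw [hidx]
    simp only [Option.map_some]
    show PySem.List.slice (a :: pre) none (some ((idx + 1 : Nat) : Int)) ++ [c]
        = a :: (PySem.List.slice pre none (some ((idx : Nat) : Int)) ++ [c])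
    rw [PySem.List.slice_to_natCast, PySem.List.slice_to_natCast]
    simp [List.take_succ_cons]
  · have hc' : pre.contains c = false := by simpa using hm
    have hc : (a :: pre).contains c = false := by
      simp only [List.contains_cons, hc', Bool.or_false, beq_eq_false_iff_ne, ne_eq]
      exact h
    rw [hc, hc']
    simp

-- stepping on the head resets to the singleton
lemma cleanStepA_cons_self (a : List Int) (pre : List (List Int)) :
    cleanStepA (a :: pre) a = [a] := by
  unfold cleanStepA
  have hc : (a :: pre).contains a = true := by simp
  rw [hc, if_pos rfl, PySem.List.index?_cons_self]
  show PySem.List.slice (a :: pre) none (some ((0 : Nat) : Int)) ++ [a] = [a]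
  rw [PySem.List.slice_to_natCast]
  simp

-- a coordinate absent from the rest of the input stays in front of everything
lemma foldl_cleanStepA_cons (xs : List (List Int)) :
    ∀ (a : List Int) (pre : List (List Int)), a ∉ xs →
      xs.foldl cleanStepA (a :: pre) = a :: xs.foldl cleanStepA pre := by
  induction xs with
  | nil => intro a pre _; rfl
  | cons x xs ih =>
    intro a pre h
    have hxa : x ≠ a := fun h' => h (h' ▸ List.mem_cons_self)
    have hxs : a ∉ xs := fun h' => h (List.mem_cons_of_mem _ h')
    rw [List.foldl_cons, List.foldl_cons, cleanStepA_cons_ne a pre x hxa, ih a _ hxs]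

-- the head of the cleaned list never changes
lemma foldl_cleanStepA_head (ys : List (List Int)) :
    ∀ (a : List Int) (pre : List (List Int)),
      ∃ pre', ys.foldl cleanStepA (a :: pre) = a :: pre' := by
  induction ys with
  | nil => intro a pre; exact ⟨pre, rfl⟩
  | cons y ys ih =>
    intro a pre
    by_cases hy : y = a
    · subst hy
      rw [List.foldl_cons, cleanStepA_cons_self]
      exact ih y []
    · rw [List.foldl_cons, cleanStepA_cons_ne a pre y hy]
      exact ih a _

-- last-occurrence decomposition
lemma exists_last_occ (a : List Int) (xs : List (List Int)) (h : a ∈ xs) :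
    ∃ ys zs, xs = ys ++ a :: zs ∧ a ∉ zs := by
  have hrev : a ∈ xs.reverse := List.mem_reverse.2 h
  obtain ⟨k, hk⟩ := Option.isSome_iff_exists.mp
    ((PySem.List.index?_isSome_iff xs.reverse a).2 hrev)
  obtain ⟨pre, suf, hsplit, _, hnp⟩ := (PySem.List.index?_eq_some_iff _ a k).1 hk
  refine ⟨suf.reverse, pre.reverse, ?_, by simpa using hnp⟩
  have := congrArg List.reverse hsplit
  simpa using this

-- A's fold computes le_
lemma foldl_cleanStepA_eq_le : ∀ (n : Nat) (xs : List (List Int)),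
    xs.length ≤ n → xs.foldl cleanStepA [] = le_ xs := by
  intro n
  induction n with
  | zero =>
    intro xs h
    rw [List.length_eq_zero_iff.1 (Nat.le_zero.1 h)]
    simp [le_]
  | succ n ih =>
    intro xs h
    match xs with
    | [] => simp [le_]
    | a :: rest =>
      have hstep0 : cleanStepA [] a = [a] := by
        unfold cleanStepA; simp
      rw [List.foldl_cons, hstep0]
      by_cases hm : a ∈ rest
      · obtain ⟨ys, zs, hsplit, hnz⟩ := exists_last_occ a rest hm
        subst hsplit
        rw [List.foldl_append]
        obtain ⟨pre', hpre'⟩ := foldl_cleanStepA_head ys a []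
        rw [hpre', List.foldl_cons, cleanStepA_cons_self,
            foldl_cleanStepA_cons zs a [] hnz]
        have hlen : zs.length ≤ n := by
          simp only [List.length_cons, List.length_append] at h
          omega
        rw [ih zs hlen]
        show a :: le_ zs = le_ (a :: (ys ++ a :: zs))
        rw [le_, afterLast_append a ys zs hnz]
      · rw [foldl_cleanStepA_cons rest a [] hm]
        have hlen : rest.length ≤ n := by
          simp only [List.length_cons] at h; omega
        rw [ih rest hlen]
        show a :: le_ rest = le_ (a :: rest)
        rw [le_, afterLast_not_mem a rest hm]

-- ---- B-side: the last-occurrence dict and the jump loop compute le_ ----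

-- the dict built by the enumerate loop answers last-occurrence queries
lemma get?_lastDict (pts : List (List Int)) (c : List Int) :
    ∀ j, (lastDict pts).get? c = some j →
      ∃ (hj : j < pts.length), pts[j] = c ∧ c ∉ pts.drop (j + 1) := by
  induction pts using List.reverseRecOn with
  | nil => intro j h; simp [lastDict, PySem.Dict.get?_empty] at h
  | append_singleton l x ih =>
    intro j h
    have hfold : lastDict (l ++ [x])
        = (lastDict l).insert x l.length := by
      unfold lastDict
      rw [List.zipIdx_append, List.foldl_append]
      simp [List.zipIdx]
    rw [hfold, PySem.Dict.get?_insert] at h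
    by_cases hc : c = x
    · rw [if_pos hc] at h
      have hj : j = l.length := by injection h with h'; omega
      subst hj hc
      refine ⟨by simp, ?_, ?_⟩
      · simp
      · rw [List.drop_eq_nil_of_le (by simp)]
        simp
    · rw [if_neg hc] at h
      obtain ⟨hj, hget, hnd⟩ := ih j h
      refine ⟨by simp; omega, ?_, ?_⟩
      · rw [List.getElem_append_left hj]; exact hget
      · rw [List.drop_append_of_le_length (by omega), List.mem_append]
        push Not
        exact ⟨hnd, by simpa using hc⟩

lemma mem_keys_lastDict (pts : List (List Int)) (c : List Int) (h : c ∈ pts) :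
    ∃ j, (lastDict pts).get? c = some j := by
  apply Option.isSome_iff_exists.mp
  rw [← PySem.Dict.contains_eq_isSome_get?]
  unfold lastDict
  rw [PySem.Dict.contains_iff_mem_keys,
      PySem.Dict.keys_foldl_insert_key pts.zipIdx (·.1) (fun d ci => ci.2) _,
      List.zipIdx_map_fst 0 pts]
  show c ∈ PySem.Set.update ([] : List (List Int)) pts
  rw [show PySem.Set.update ([] : List (List Int)) pts = PySem.Set.ofList pts from rfl]
  exact (PySem.Set.mem_ofList pts c).2 h

-- the jump loop appends le_ of the remaining suffix
lemma goB_eq_le (pts : List (List Int)) : ∀ (fuel i : Nat) (res : List (List Int)),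
    pts.length - i ≤ fuel →
    goB pts (lastDict pts) fuel i res = res ++ le_ (pts.drop i) := by
  intro fuel
  induction fuel with
  | zero =>
    intro i res h
    have : pts.drop i = [] := List.drop_eq_nil_of_le (by omega)
    rw [this]
    simp [goB, le_]
  | succ fuel ih =>
    intro i res h
    by_cases hi : i < pts.length
    · have hget : pts[i]? = some pts[i] := List.getElem?_eq_getElem hi
      have hmem : pts[i] ∈ pts := List.getElem_mem hi
      obtain ⟨j, hj⟩ := mem_keys_lastDict pts pts[i] hmem
      obtain ⟨hjlt, hjget, hjnd⟩ := get?_lastDict pts pts[i] j hj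
      have hij : i ≤ j := by
        by_contra hlt
        push Not at hlt
        exact hjnd (by
          have : pts[i] ∈ pts.drop (j + 1) := by
            rw [List.mem_iff_getElem]
            exact ⟨i - (j + 1), by rw [List.length_drop]; omega,
              by rw [List.getElem_drop]; congr 1; omega⟩
          exact this)
      rw [goB, if_pos hi, hget]
      show (match (lastDict pts).get? pts[i] with
            | none => res ++ [pts[i]]
            | some j => goB pts (lastDict pts) fuel (j + 1) (res ++ [pts[i]]))
          = res ++ le_ (pts.drop i)
      rw [hj]
      show goB pts (lastDict pts) fuel (j + 1) (res ++ [pts[i]]) = res ++ le_ (pts.drop i)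
      rw [ih (j + 1) (res ++ [pts[i]]) (by omega), List.append_assoc]
      congr 1
      -- le_ (drop i pts) = pts[i] :: le_ (drop (j+1) pts)
      have hdropi : pts.drop i = pts[i] :: pts.drop (i + 1) :=
        List.drop_eq_getElem_cons hi
      rw [hdropi, le_]
      simp only [List.cons_append, List.nil_append, List.cons.injEq, true_and]
      congr 1
      -- afterLast pts[i] (drop (i+1) pts) = drop (j+1) pts
      by_cases hji : j = i
      · subst hji
        exact (afterLast_not_mem _ _ hjnd).symm
      · have hij' : i + 1 ≤ j := by omega
        have hdecomp : pts.drop (i + 1)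
            = (pts.drop (i + 1)).take (j - (i + 1)) ++ (pts[j] :: pts.drop (j + 1)) := by
          conv_lhs => rw [← List.take_append_drop (j - (i + 1)) (pts.drop (i + 1))]
          congr 1
          rw [List.drop_drop]
          rw [show i + 1 + (j - (i + 1)) = j from by omega]
          exact List.drop_eq_getElem_cons hjlt
        rw [hdecomp, hjget]
        exact (afterLast_append _ _ _ hjnd).symm
    · rw [goB, if_neg hi]
      rw [List.drop_eq_nil_of_le (by omega)]
      simp [le_]

-- ===== VERDICT (by name: the statement is the Claim_ definition above) =====
theorem clean_path_spec : Claim_equal_clean_path := by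
  intro path _
  unfold Spec_clean_path clean_path clean_path_alt
  by_cases hp : path = []
  · simp [hp]
  · simp only [hp, if_false]
    rw [PySem.List.foldl_append_singleton, List.nil_append]
    rw [goB_eq_le path path.length 0 [] (by omega)]
    rw [List.drop_zero, List.nil_append]
    exact foldl_cleanStepA_eq_le path.length path (Nat.le_refl _)
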